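-- pv_equiv track=rewrite | github.com/hojoon123/PythonAlgorithems | 08.그리디/240115-23_Greedy/3109_빵집.py | dfs
-- ===== SOURCE A (Python) =====
-- def dfs(x, y, r, c, dx, visited, world):
--     for i in range(3):
--         nx = x + dx[i]
--         ny = y + 1
--         if nx < 0 or nx >= r or ny < 0 or ny >= c:
--             continue
--         if visited[nx][ny] == 0 and world[nx][ny] == '.':
--             visited[nx][ny] = 1
--             if ny == c - 1:
--                 return True
--
--             if dfs(nx,ny , r, c, dx, visited, world):
--                 return True
--     return False
-- ===== SOURCE B (Python) =====
-- def dfs(x, y, r, c, dx, visited, world):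
--     # Iterative DFS with an explicit stack instead of recursion.
--     # Pushes the three next-column neighbors in reverse priority order so that
--     # dx[0] is popped first; validity/visited checks are done at pop time.
--     stack = [(x + dx[i], y + 1) for i in range(2, -1, -1)]
--     while stack:
--         nx, ny = stack.pop()
--         if nx < 0 or nx >= r or ny < 0 or ny >= c:
--             continue
--         if visited[nx][ny] == 0 and world[nx][ny] == '.':
--             visited[nx][ny] = 1
--             if ny == c - 1:
--                 return True
--             for i in range(2, -1, -1):
--                 stack.append((nx + dx[i], ny + 1))
--     return False
-- ===== Notes on version B (the rewrite author's own statement) =====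
-- stated objective: alternative
-- what changed: The greedy grid DFS is rewritten from recursion into an iterative loop over an explicit stack, with neighbors pushed in reverse priority order and the validity/visited check redone at pop time; it marks the same visited cells in the same order and returns the same Boolean.
-- outside the precondition, e.g. on dfs(0, -1, 1, 1, [0], [[0]], [['.']]): A returns True, B raises IndexError; on dfs(0, -1, 2, 1, [0, 0, 0], [[0]], [['x']]): A returns False, B returns False
import Mathlib
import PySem

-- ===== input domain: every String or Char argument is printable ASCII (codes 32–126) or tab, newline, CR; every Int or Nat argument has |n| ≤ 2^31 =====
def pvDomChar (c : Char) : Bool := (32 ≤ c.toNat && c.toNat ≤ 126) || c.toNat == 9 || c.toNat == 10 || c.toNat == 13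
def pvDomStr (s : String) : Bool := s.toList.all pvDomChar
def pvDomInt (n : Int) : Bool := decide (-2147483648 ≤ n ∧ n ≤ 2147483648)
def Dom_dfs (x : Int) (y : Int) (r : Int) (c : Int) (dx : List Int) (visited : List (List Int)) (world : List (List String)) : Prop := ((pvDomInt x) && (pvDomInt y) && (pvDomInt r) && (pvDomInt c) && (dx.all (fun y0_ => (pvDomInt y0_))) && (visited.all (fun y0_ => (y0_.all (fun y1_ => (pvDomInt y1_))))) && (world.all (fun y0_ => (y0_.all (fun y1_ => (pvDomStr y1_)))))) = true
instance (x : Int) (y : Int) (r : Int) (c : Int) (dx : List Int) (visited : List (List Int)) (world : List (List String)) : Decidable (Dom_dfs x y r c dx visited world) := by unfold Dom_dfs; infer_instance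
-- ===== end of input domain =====

-- B rewrites the recursive greedy DFS as an iterative loop over an explicit stack (neighbors pushed
-- in reverse priority order, checks redone at pop time); equivalence is proved for the RETURN VALUE;
-- both Pythons mutate `visited` in place, and B performs the same marks in the same order as A
-- (verified by testing, not by the theorem).

-- ===== PORT A =====
-- shared 2-D indexing helpers: inside Pre_ every performed access is in range, so `getD` is exact
def pvGet2 (v : List (List Int)) (i j : Int) : Int := (v.getD i.toNat []).getD j.toNat 0
def pvGetS (w : List (List String)) (i j : Int) : String := (w.getD i.toNat []).getD j.toNat ""
def pvSet2 (v : List (List Int)) (i j : Int) : List (List Int) :=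
  v.set i.toNat ((v.getD i.toNat []).set j.toNat 1)

-- A's recursion, step for step: the `for i in range(3)` loop is the list [0,1,2]; the Nat fuel is a
-- pure totality guard — the 0-branch is only reachable at column y + fuel ≥ c + 2, where the bounds
-- check has already skipped the cell, so it never alters the computed value.
def goA (r : Int) (c : Int) (dx : List Int) (world : List (List String)) :
    Nat → Int → Int → List Nat → List (List Int) → Bool × List (List Int)
  | _, _, _, [], v => (false, v)
  | g, x, y, i :: is, v =>
    let nx := x + dx.getD i 0
    let ny := y + 1
    if nx < 0 ∨ r ≤ nx ∨ ny < 0 ∨ c ≤ ny then goA r c dx world g x y is v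
    else if pvGet2 v nx ny = 0 ∧ pvGetS world nx ny = "." then
      if ny = c - 1 then (true, pvSet2 v nx ny)
      else
        match g with
        | 0 => goA r c dx world 0 x y is (pvSet2 v nx ny)  -- fuel guard, never reached (see above)
        | g' + 1 =>
          let p := goA r c dx world g' nx ny [0, 1, 2] (pvSet2 v nx ny)
          if p.1 then p else goA r c dx world (g' + 1) x y is p.2
    else goA r c dx world g x y is v
  termination_by g x y l _ => (g, l.length)

def dfs (x : Int) (y : Int) (r : Int) (c : Int) (dx : List Int) (visited : List (List Int)) (world : List (List String)) : Bool :=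
  (goA r c dx world ((c - y).toNat + 1) x y [0, 1, 2] visited).1

-- ===== PORT B =====
-- Source B's explicit stack; the head of the list is the top of the stack (python pushes i = 2,1,0 and
-- pops from the end, so i = 0 is on top).  Entries carry the same Nat fuel as goA, again a pure
-- totality guard whose 0-branch is unreachable (column y + fuel ≥ c + 2 fails the bounds check).
def goB (r : Int) (c : Int) (dx : List Int) (world : List (List String)) :
    List (Nat × Int × Int) → List (List Int) → Bool
  | [], _ => false
  | (g, nx, ny) :: rest, v =>
    if nx < 0 ∨ r ≤ nx ∨ ny < 0 ∨ c ≤ ny then goB r c dx world rest v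
    else if pvGet2 v nx ny = 0 ∧ pvGetS world nx ny = "." then
      if ny = c - 1 then true
      else
        match g with
        | 0 => goB r c dx world rest (pvSet2 v nx ny)  -- fuel guard, never reached (see above)
        | g' + 1 =>
          goB r c dx world
            ((g', nx + dx.getD 0 0, ny + 1) :: (g', nx + dx.getD 1 0, ny + 1) ::
             (g', nx + dx.getD 2 0, ny + 1) :: rest) (pvSet2 v nx ny)
    else goB r c dx world rest v
  termination_by st _ => (st.map (fun e => 4 ^ e.1)).sum
  decreasing_by
  all_goals simp [pow_succ]
  all_goals nlinarith [pow_pos (show 0 < 4 by norm_num) g']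

def dfs_alt (x : Int) (y : Int) (r : Int) (c : Int) (dx : List Int) (visited : List (List Int)) (world : List (List String)) : Bool :=
  goB r c dx world
    [((c - y).toNat + 1, x + dx.getD 0 0, y + 1),
     ((c - y).toNat + 1, x + dx.getD 1 0, y + 1),
     ((c - y).toNat + 1, x + dx.getD 2 0, y + 1)] visited

-- ===== PRECONDITION & SPEC =====
-- Pre_ excludes inputs on which the bound-checked indexing can raise: dx with fewer than 3 entries
-- (A indexes dx lazily and can return before reaching the missing index, B reads all three upfront
-- and raises there), and grids with fewer than r rows or rows shorter than c unless provably no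
-- cell is ever inspected (next column out of range, or all three neighbor rows out of range);
-- on deeper-shaped grids A can still return if its path happens to avoid every missing cell.
def Pre_dfs (x : Int) (y : Int) (r : Int) (c : Int) (dx : List Int) (visited : List (List Int)) (world : List (List String)) : Prop :=
  3 ≤ dx.length ∧
  ((r.toNat ≤ visited.length ∧ r.toNat ≤ world.length ∧
    (∀ row ∈ visited, c.toNat ≤ row.length) ∧ (∀ row ∈ world, c.toNat ≤ row.length)) ∨
   y + 1 < 0 ∨ c ≤ y + 1 ∨ (∀ d ∈ dx.take 3, x + d < 0 ∨ r ≤ x + d))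
instance (x : Int) (y : Int) (r : Int) (c : Int) (dx : List Int) (visited : List (List Int)) (world : List (List String)) : Decidable (Pre_dfs x y r c dx visited world) := by unfold Pre_dfs; infer_instance

def pvWitness_dfs : Int × Int × Int × Int × List Int × List (List Int) × List (List String) :=
  (0, 0, 2, 3, [-1, 0, 1], [[0, 0, 0], [0, 0, 0]], [[".", ".", "."], [".", ".", "."]])

def Spec_dfs (x : Int) (y : Int) (r : Int) (c : Int) (dx : List Int) (visited : List (List Int)) (world : List (List String)) (out : Bool) : Prop := out = dfs_alt x y r c dx visited world
instance (x : Int) (y : Int) (r : Int) (c : Int) (dx : List Int) (visited : List (List Int)) (world : List (List String)) (out : Bool) : Decidable (Spec_dfs x y r c dx visited world out) := by unfold Spec_dfs; infer_instance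

-- ===== CLAIM (what is proved, stated in full; the proofs are below) =====
def Claim_equal_dfs : Prop := ∀ (x : Int) (y : Int) (r : Int) (c : Int) (dx : List Int) (visited : List (List Int)) (world : List (List String)), Dom_dfs x y r c dx visited world → Pre_dfs x y r c dx visited world → Spec_dfs x y r c dx visited world (dfs x y r c dx visited world)

-- ===== LEMMAS AND PROOFS =====
-- The stack machine linearizes the recursion: running goB on the entries for node (x,y)'s pending
-- neighbor indices l (each carrying fuel g) on top of `rest` equals running goA g on l and, if that
-- fails, continuing goB on `rest` with the visited grid goA left behind.
theorem pv_key (r : Int) (c : Int) (dx : List Int) (world : List (List String)) :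
    ∀ (g : Nat) (x y : Int) (l : List Nat) (rest : List (Nat × Int × Int)) (v : List (List Int)),
      goB r c dx world (l.map (fun i => (g, x + dx.getD i 0, y + 1)) ++ rest) v =
        (if (goA r c dx world g x y l v).1 then true
         else goB r c dx world rest (goA r c dx world g x y l v).2) := by
  intro g
  induction g with
  | zero =>
    intro x y l
    induction l with
    | nil => intro rest v; simp [goA]
    | cons i is ih =>
      intro rest v
      by_cases h1 : (x + dx.getD i 0 < 0 ∨ r ≤ x + dx.getD i 0 ∨ y + 1 < 0 ∨ c ≤ y + 1)
      · simp only [List.map_cons, List.cons_append, goB, goA, if_pos h1]; exact ih rest v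
      · by_cases h2 : (pvGet2 v (x + dx.getD i 0) (y + 1) = 0 ∧ pvGetS world (x + dx.getD i 0) (y + 1) = ".")
        · by_cases h3 : (y + 1 : Int) = c - 1
          · simp only [List.map_cons, List.cons_append, goB, goA, if_neg h1, if_pos h2, if_pos h3]
            simp
          · simp only [List.map_cons, List.cons_append, goB, goA, if_neg h1, if_pos h2, if_neg h3]
            exact ih rest (pvSet2 v (x + dx.getD i 0) (y + 1))
        · simp only [List.map_cons, List.cons_append, goB, goA, if_neg h1, if_neg h2]; exact ih rest v
  | succ g' ihg =>
    intro x y l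
    induction l with
    | nil => intro rest v; simp [goA]
    | cons i is ih =>
      intro rest v
      by_cases h1 : (x + dx.getD i 0 < 0 ∨ r ≤ x + dx.getD i 0 ∨ y + 1 < 0 ∨ c ≤ y + 1)
      · simp only [List.map_cons, List.cons_append, goB, goA, if_pos h1]; exact ih rest v
      · by_cases h2 : (pvGet2 v (x + dx.getD i 0) (y + 1) = 0 ∧ pvGetS world (x + dx.getD i 0) (y + 1) = ".")
        · by_cases h3 : (y + 1 : Int) = c - 1
          · simp only [List.map_cons, List.cons_append, goB, goA, if_neg h1, if_pos h2, if_pos h3]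
            simp
          · simp only [List.map_cons, List.cons_append, goB, goA, if_neg h1, if_pos h2, if_neg h3]
            have hrec := ihg (x + dx.getD i 0) (y + 1) [0, 1, 2]
              (is.map (fun j => (g' + 1, x + dx.getD j 0, y + 1)) ++ rest)
              (pvSet2 v (x + dx.getD i 0) (y + 1))
            simp only [List.map_cons, List.map_nil, List.cons_append, List.nil_append] at hrec
            rw [hrec]
            by_cases hp : (goA r c dx world g' (x + dx.getD i 0) (y + 1) [0, 1, 2]
                 (pvSet2 v (x + dx.getD i 0) (y + 1))).1 = true
            all_goals simp only [List.getD_eq_getElem?_getD] at hp ih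
            · simp [hp]
            · simp [hp, ih]
        · simp only [List.map_cons, List.cons_append, goB, goA, if_neg h1, if_neg h2]; exact ih rest v

-- ===== VERDICT (by name: the statement is the Claim_ definition above) =====
theorem dfs_spec : Claim_equal_dfs := by
  intro x y r c dx visited world _ _
  unfold Spec_dfs dfs dfs_alt
  have h := pv_key r c dx world ((c - y).toNat + 1) x y [0, 1, 2] [] visited
  simp only [List.map_cons, List.map_nil, List.append_nil] at h
  rw [h]
  by_cases hp : (goA r c dx world ((c - y).toNat + 1) x y [0, 1, 2] visited).1 <;> simp [hp, goB]
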